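-- pv_equiv track=rewrite | github.com/insighteleven-design/football-finance-dashboard | scripts/refresh_transfermarkt.py | build_age_bands
-- ===== SOURCE A (Python) =====
-- from typing import Optional
--
-- def build_age_bands(players: list) -> Optional[dict]:
--     bands: dict = {"under_21": 0, "age_21_23": 0, "age_24_26": 0, "age_27_29": 0, "over_30": 0}
--     counted = 0
--     for p in players:
--         age = p.get("age")
--         if not isinstance(age, int):
--             continue
--         counted += 1
--         if age < 21:
--             bands["under_21"] += 1
--         elif age <= 23:
--             bands["age_21_23"] += 1
--         elif age <= 26:
--             bands["age_24_26"] += 1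
--         elif age <= 29:
--             bands["age_27_29"] += 1
--         else:
--             bands["over_30"] += 1
--     return bands if counted > 0 else None
-- ===== SOURCE B (Python) =====
-- from typing import Optional
--
-- def build_age_bands(players: list) -> Optional[dict]:
--     ages = [p.get("age") for p in players if isinstance(p.get("age"), int)]
--     if not ages:
--         return None
--     c20, c23, c26, c29 = (sum(1 for a in ages if a <= t) for t in (20, 23, 26, 29))
--     return {
--         "under_21": c20,
--         "age_21_23": c23 - c20,
--         "age_24_26": c26 - c23,
--         "age_27_29": c29 - c26,
--         "over_30": len(ages) - c29,
--     }
-- ===== Notes on version B (the rewrite author's own statement) =====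
-- stated objective: alternative
-- what changed: B replaces A's per-element five-way bucketing loop by staged passes: it first extracts the list of int ages, then computes four cumulative threshold counts (ages <= 20/23/26/29) and derives each band as a difference of adjacent cumulative counts, with over_30 = len(ages) - c29.
import Mathlib
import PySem

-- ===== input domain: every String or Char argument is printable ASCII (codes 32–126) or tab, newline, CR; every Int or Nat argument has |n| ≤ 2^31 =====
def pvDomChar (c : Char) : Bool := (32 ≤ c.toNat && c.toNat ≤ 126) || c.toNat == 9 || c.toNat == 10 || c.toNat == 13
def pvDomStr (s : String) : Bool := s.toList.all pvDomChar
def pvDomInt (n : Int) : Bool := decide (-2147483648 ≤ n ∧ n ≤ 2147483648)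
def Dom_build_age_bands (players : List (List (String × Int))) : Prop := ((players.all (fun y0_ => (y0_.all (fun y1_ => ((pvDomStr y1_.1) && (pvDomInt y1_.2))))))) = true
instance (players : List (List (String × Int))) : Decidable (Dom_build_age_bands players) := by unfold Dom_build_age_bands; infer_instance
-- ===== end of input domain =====

-- B replaces A's per-element five-way bucketing by staged passes: extract the ages list,
-- take four cumulative threshold counts and derive each band by subtraction (objective: alternative).

-- ===== PORT A =====
-- one loop iteration of A: p.get("age") (dict values are Int, so isinstance(age, int) holds
-- exactly when the key is present), counted += 1, then the if-elif cascade.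
-- bands["k"] += 1 is Dict.modify (the key is always present, so the default 0 is never used).
def stepA (st : PySem.Dict String Int × Int) (p : List (String × Int)) :
    PySem.Dict String Int × Int :=
  match (PySem.Dict.mk p).get? "age" with
  | none => st
  | some age =>
    let counted := st.2 + 1
    if age < 21 then (st.1.modify "under_21" 0 (· + 1), counted)
    else if age ≤ 23 then (st.1.modify "age_21_23" 0 (· + 1), counted)
    else if age ≤ 26 then (st.1.modify "age_24_26" 0 (· + 1), counted)
    else if age ≤ 29 then (st.1.modify "age_27_29" 0 (· + 1), counted)
    else (st.1.modify "over_30" 0 (· + 1), counted)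

def build_age_bands (players : List (List (String × Int))) : Option (List (String × Int)) :=
  let st := players.foldl stepA
    (PySem.Dict.mk [("under_21", 0), ("age_21_23", 0), ("age_24_26", 0), ("age_27_29", 0), ("over_30", 0)], 0)
  if st.2 > 0 then some st.1.items else none

-- ===== PORT B =====
-- ages = [p.get("age") for p in players if isinstance(p.get("age"), int)]
def bAges (players : List (List (String × Int))) : List Int :=
  players.filterMap (fun p => (PySem.Dict.mk p).get? "age")

-- sum(1 for a in ages if a <= t)
def bCount (t : Int) (ages : List Int) : Int :=
  ages.foldl (fun acc a => if a ≤ t then acc + 1 else acc) 0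

def build_age_bands_alt (players : List (List (String × Int))) : Option (List (String × Int)) :=
  let ages := bAges players
  if ages = [] then none
  else
    let c20 := bCount 20 ages
    let c23 := bCount 23 ages
    let c26 := bCount 26 ages
    let c29 := bCount 29 ages
    some [("under_21", c20), ("age_21_23", c23 - c20), ("age_24_26", c26 - c23),
          ("age_27_29", c29 - c26), ("over_30", (ages.length : Int) - c29)]

-- ===== PRECONDITION & SPEC =====
def Spec_build_age_bands (players : List (List (String × Int))) (out : Option (List (String × Int))) : Prop := out = build_age_bands_alt players
instance (players : List (List (String × Int))) (out : Option (List (String × Int))) : Decidable (Spec_build_age_bands players out) := by unfold Spec_build_age_bands; infer_instance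

-- ===== CLAIM (what is proved, stated in full; the proofs are below) =====
def Claim_equal_build_age_bands : Prop := ∀ (players : List (List (String × Int))), Dom_build_age_bands players → Spec_build_age_bands players (build_age_bands players)

-- ===== LEMMAS AND PROOFS =====

def dictOf (c0 c1 c2 c3 c4 : Int) : PySem.Dict String Int :=
  PySem.Dict.mk [("under_21", c0), ("age_21_23", c1), ("age_24_26", c2), ("age_27_29", c3), ("over_30", c4)]

lemma bCount_acc (t : Int) (ages : List Int) : ∀ n : Int,
    ages.foldl (fun acc a => if a ≤ t then acc + 1 else acc) n = n + bCount t ages := by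
  induction ages with
  | nil => intro n; simp [bCount]
  | cons a l ih =>
    intro n
    simp only [bCount, List.foldl_cons]
    by_cases h : a ≤ t
    · rw [if_pos h, if_pos h, ih (n + 1), ih (0 + 1)]; ring
    · rw [if_neg h, if_neg h, ih n, ih 0]; ring

lemma bCount_cons (t a : Int) (l : List Int) :
    bCount t (a :: l) = (if a ≤ t then 1 else 0) + bCount t l := by
  simp only [bCount, List.foldl_cons]
  by_cases h : a ≤ t <;> simp [h, bCount_acc t l]

lemma dict_pair_eq {a a' b b' c c' d d' e e' n n' : Int} (h0 : a = a') (h1 : b = b')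
    (h2 : c = c') (h3 : d = d') (h4 : e = e') (hn : n = n') :
    (dictOf a b c d e, n) = (dictOf a' b' c' d' e', n') := by
  subst h0 h1 h2 h3 h4 hn; rfl

lemma items_dictOf (a b c d e : Int) :
    (dictOf a b c d e).items = [("under_21", a), ("age_21_23", b), ("age_24_26", c), ("age_27_29", d), ("over_30", e)] := rfl

lemma loop_eq (players : List (List (String × Int))) :
    ∀ c0 c1 c2 c3 c4 n : Int,
      players.foldl stepA (dictOf c0 c1 c2 c3 c4, n)
        = (dictOf (c0 + bCount 20 (bAges players))
                  (c1 + (bCount 23 (bAges players) - bCount 20 (bAges players)))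
                  (c2 + (bCount 26 (bAges players) - bCount 23 (bAges players)))
                  (c3 + (bCount 29 (bAges players) - bCount 26 (bAges players)))
                  (c4 + (((bAges players).length : Int) - bCount 29 (bAges players))),
           n + ((bAges players).length : Int)) := by
  induction players with
  | nil => intro c0 c1 c2 c3 c4 n; simp [bAges, bCount]
  | cons p ps ih =>
    intro c0 c1 c2 c3 c4 n
    simp only [List.foldl_cons]
    cases hg : (PySem.Dict.mk p).get? "age" with
    | none =>
      have hA : bAges (p :: ps) = bAges ps := by simp [bAges, hg]
      rw [show stepA (dictOf c0 c1 c2 c3 c4, n) p = (dictOf c0 c1 c2 c3 c4, n) by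
            simp [stepA, hg], hA]
      exact ih c0 c1 c2 c3 c4 n
    | some age =>
      have hA : bAges (p :: ps) = age :: bAges ps := by simp [bAges, hg]
      rw [hA]
      simp only [bCount_cons, List.length_cons]
      by_cases h1 : age < 21
      · have t20 : age ≤ 20 := by omega
        rw [show stepA (dictOf c0 c1 c2 c3 c4, n) p = (dictOf (c0 + 1) c1 c2 c3 c4, n + 1) by
              simp only [stepA, hg]; rw [if_pos h1]; rfl, ih,
            if_pos t20, if_pos (show age ≤ 23 by omega), if_pos (show age ≤ 26 by omega),
            if_pos (show age ≤ 29 by omega)]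
        exact dict_pair_eq (by ring) (by ring) (by ring) (by ring) (by push_cast; ring) (by push_cast; ring)
      · by_cases h2 : age ≤ 23
        · rw [show stepA (dictOf c0 c1 c2 c3 c4, n) p = (dictOf c0 (c1 + 1) c2 c3 c4, n + 1) by
                simp only [stepA, hg]; rw [if_neg h1, if_pos h2]; rfl, ih,
              if_neg (show ¬ age ≤ 20 by omega), if_pos h2, if_pos (show age ≤ 26 by omega),
              if_pos (show age ≤ 29 by omega)]
          exact dict_pair_eq (by ring) (by ring) (by ring) (by ring) (by push_cast; ring) (by push_cast; ring)
        · by_cases h3 : age ≤ 26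
          · rw [show stepA (dictOf c0 c1 c2 c3 c4, n) p = (dictOf c0 c1 (c2 + 1) c3 c4, n + 1) by
                  simp only [stepA, hg]; rw [if_neg h1, if_neg h2, if_pos h3]; rfl, ih,
                if_neg (show ¬ age ≤ 20 by omega), if_neg h2, if_pos h3,
                if_pos (show age ≤ 29 by omega)]
            exact dict_pair_eq (by ring) (by ring) (by ring) (by ring) (by push_cast; ring) (by push_cast; ring)
          · by_cases h4 : age ≤ 29
            · rw [show stepA (dictOf c0 c1 c2 c3 c4, n) p = (dictOf c0 c1 c2 (c3 + 1) c4, n + 1) by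
                    simp only [stepA, hg]; rw [if_neg h1, if_neg h2, if_neg h3, if_pos h4]; rfl, ih,
                  if_neg (show ¬ age ≤ 20 by omega), if_neg h2, if_neg h3, if_pos h4]
              exact dict_pair_eq (by ring) (by ring) (by ring) (by ring) (by push_cast; ring) (by push_cast; ring)
            · rw [show stepA (dictOf c0 c1 c2 c3 c4, n) p = (dictOf c0 c1 c2 c3 (c4 + 1), n + 1) by
                    simp only [stepA, hg]; rw [if_neg h1, if_neg h2, if_neg h3, if_neg h4]; rfl, ih,
                  if_neg (show ¬ age ≤ 20 by omega), if_neg h2, if_neg h3, if_neg h4]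
              exact dict_pair_eq (by ring) (by ring) (by ring) (by ring) (by push_cast; ring) (by push_cast; ring)

-- ===== VERDICT (by name: the statement is the Claim_ definition above) =====
theorem build_age_bands_spec : Claim_equal_build_age_bands := by
  intro players _
  unfold Spec_build_age_bands build_age_bands build_age_bands_alt
  rw [show (PySem.Dict.mk [("under_21", (0:Int)), ("age_21_23", 0), ("age_24_26", 0), ("age_27_29", 0), ("over_30", 0)], (0:Int)) = (dictOf 0 0 0 0 0, 0) from rfl,
      loop_eq players 0 0 0 0 0 0]
  by_cases h : bAges players = []
  · simp [h]
  · have hl : (0:Int) < ((bAges players).length : Int) := by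
      have := List.length_pos_iff.mpr h
      exact_mod_cast this
    simp only [zero_add, if_pos hl, if_neg h, items_dictOf]
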